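-- pv_equiv track=rewrite | github.com/btenner84/medicare-stars-analyzer | data_parsers.py | is_special_value
-- ===== SOURCE A (Python) =====
-- SPECIAL_VALUES = [
--     "Plan too small to be measured",
--     "Plan too new to be measured",
--     "Not enough data available",
--     "Plan not required to report measure",
--     "No data available",
--     "Medicare shows only a Star Rating for this topic",
--     "CMS identified issues with this plan's data",
--     "Benefit not offered by plan",
--     "Not required to report",
-- ]
--
-- def is_special_value(value) -> bool:
--     """
--     Check if value is a special status (not numeric)
--
--     Args:
--         value: Raw value from CSV
--
--     Returns:
--         True if special status, False if numeric
--     """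
--     if value is None or str(value).strip() == '':
--         return True
--
--     value_str = str(value).strip()
--
--     # Check against known special values
--     for special in SPECIAL_VALUES:
--         if special in value_str:
--             return True
--
--     return False
-- ===== SOURCE B (Python) =====
-- SPECIAL_VALUES = [
--     "Plan too small to be measured",
--     "Plan too new to be measured",
--     "Not enough data available",
--     "Plan not required to report measure",
--     "No data available",
--     "Medicare shows only a Star Rating for this topic",
--     "CMS identified issues with this plan's data",
--     "Benefit not offered by plan",
--     "Not required to report",
-- ]
--
-- # First-character index: bucket the patterns by their first letter once,
-- # so the scan looks at each position of the input exactly once and only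
-- # tries the (few) patterns that could possibly start there.
-- _INDEX = {}
-- for _p in SPECIAL_VALUES:
--     _INDEX.setdefault(_p[0], []).append(_p)
--
-- def is_special_value(value) -> bool:
--     if value is None or str(value).strip() == '':
--         return True
--     t = str(value).strip()
--     for i, c in enumerate(t):
--         for p in _INDEX.get(c, []):
--             if t.startswith(p, i):
--                 return True
--     return False
-- ===== Notes on version B (the rewrite author's own statement) =====
-- stated objective: alternative
-- what changed: Instead of nine independent full substring scans ('special in value_str' per pattern), B buckets the patterns once by first character into a dict and makes a single pass over the string positions, at each position looking up the character and testing only the bucketed candidates with startswith.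
import Mathlib
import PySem

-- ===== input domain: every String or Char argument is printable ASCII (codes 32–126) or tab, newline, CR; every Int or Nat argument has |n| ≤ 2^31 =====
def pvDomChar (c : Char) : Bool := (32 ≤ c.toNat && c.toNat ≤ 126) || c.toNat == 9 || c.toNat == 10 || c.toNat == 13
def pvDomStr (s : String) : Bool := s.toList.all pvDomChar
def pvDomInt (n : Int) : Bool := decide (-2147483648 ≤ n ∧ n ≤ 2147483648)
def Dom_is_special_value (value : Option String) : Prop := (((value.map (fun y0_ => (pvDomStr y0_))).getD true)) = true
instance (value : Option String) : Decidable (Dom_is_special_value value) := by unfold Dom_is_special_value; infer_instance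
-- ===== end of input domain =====

-- B buckets the patterns once by first character and makes a single pass over the
-- string positions (bucket lookup + startswith at each), instead of A's nine
-- independent substring scans; same return value, objective: alternative.

-- ===== PORT A =====
def SPECIAL_VALUES : List String := [
  "Plan too small to be measured",
  "Plan too new to be measured",
  "Not enough data available",
  "Plan not required to report measure",
  "No data available",
  "Medicare shows only a Star Rating for this topic",
  "CMS identified issues with this plan's data",
  "Benefit not offered by plan",
  "Not required to report"]

def is_special_value (value : Option String) : Bool :=
  match value with
  | none => true
  | some s =>
    if PySem.Str.strip s == "" then true
    else
      let value_str := PySem.Str.strip s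
      -- for special in SPECIAL_VALUES: if special in value_str: return True
      SPECIAL_VALUES.any (fun special => PySem.Str.isIn special value_str)

-- ===== PORT B =====
-- the patterns as char lists (str operations are done at the char level)
def pvPatterns : List (List Char) := SPECIAL_VALUES.map String.toList

-- module-level index: _INDEX.setdefault(p[0], []).append(p) for each pattern
def pvIndex : PySem.Dict Char (List (List Char)) :=
  pvPatterns.foldl
    (fun d p => d.insert (p.headD ' ') ((d.getD (p.headD ' ') []) ++ [p]))
    PySem.Dict.empty

-- for i, c in enumerate(t): for p in _INDEX.get(c, []): if t.startswith(p, i): return True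
def pvScanB : List Char → Bool
  | [] => false
  | c :: rest => ((pvIndex.getD c []).any (fun p => p.isPrefixOf (c :: rest))) || pvScanB rest

def is_special_value_alt (value : Option String) : Bool :=
  match value with
  | none => true
  | some s =>
    if PySem.Str.strip s == "" then true
    else pvScanB (PySem.Str.strip s).toList

-- ===== PRECONDITION & SPEC =====
def Spec_is_special_value (value : Option String) (out : Bool) : Prop := out = is_special_value_alt value
instance (value : Option String) (out : Bool) : Decidable (Spec_is_special_value value out) := by unfold Spec_is_special_value; infer_instance

-- ===== CLAIM (what is proved, stated in full; the proofs are below) =====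
def Claim_equal_is_special_value : Prop := ∀ (value : Option String), Dom_is_special_value value → Spec_is_special_value value (is_special_value value)

-- ===== LEMMAS AND PROOFS =====

-- the fold building the index yields, at every key, exactly the patterns whose first char is that key
theorem pvIndex_fold_getD (pats : List (List Char)) (d : PySem.Dict Char (List (List Char))) (c : Char) :
    (pats.foldl (fun d p => d.insert (p.headD ' ') ((d.getD (p.headD ' ') []) ++ [p])) d).getD c []
      = d.getD c [] ++ pats.filter (fun p => p.headD ' ' == c) := by
  induction pats generalizing d with
  | nil => simp
  | cons p ps ih =>
    simp only [List.foldl_cons, List.filter_cons, ih]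
    rw [PySem.Dict.getD_insert]
    cases p with
    | nil =>
      by_cases h : c = ' '
      · subst h; simp
      · have h' : ¬ (' ' = c) := fun e => h e.symm
        simp [h, h']
    | cons q t =>
      by_cases h : c = q
      · subst h; simp
      · have h' : ¬ (q = c) := fun e => h e.symm
        simp [h, h']

theorem pvIndex_getD (c : Char) :
    pvIndex.getD c [] = pvPatterns.filter (fun p => p.headD ' ' == c) := by
  unfold pvIndex
  rw [pvIndex_fold_getD]
  simp [PySem.Dict.getD, PySem.Dict.get?, PySem.Dict.empty]

theorem pvPatterns_ne_nil : ∀ p ∈ pvPatterns, p ≠ [] := by decide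

-- the bucket lookup at a position tests the same thing as testing every pattern there
theorem bucket_any (c : Char) (cs : List Char) :
    (pvIndex.getD c []).any (fun p => p.isPrefixOf (c :: cs))
      = pvPatterns.any (fun p => p.isPrefixOf (c :: cs)) := by
  rw [pvIndex_getD]
  rw [Bool.eq_iff_iff]
  simp only [List.any_eq_true, List.mem_filter]
  constructor
  · rintro ⟨p, ⟨hp, _⟩, h⟩; exact ⟨p, hp, h⟩
  · rintro ⟨p, hp, h⟩
    refine ⟨p, ⟨hp, ?_⟩, h⟩
    have hne := pvPatterns_ne_nil p hp
    obtain ⟨q, t, rfl⟩ : ∃ q t, p = q :: t := by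
      cases p with
      | nil => exact absurd rfl hne
      | cons q t => exact ⟨q, t, rfl⟩
    have := (List.isPrefixOf_iff_prefix.1 h)
    rw [List.cons_prefix_cons] at this
    simp [this.1]

theorem pvScanB_true_iff (cs : List Char) :
    pvScanB cs = true ↔ ∃ p ∈ pvPatterns, ∃ j, p <+: cs.drop j := by
  induction cs with
  | nil =>
    simp only [pvScanB, Bool.false_eq_true, false_iff]
    rintro ⟨p, hp, j, h⟩
    simp only [List.drop_nil] at h
    exact pvPatterns_ne_nil p hp (List.prefix_nil.1 h)
  | cons c cs ih =>
    simp only [pvScanB, bucket_any, Bool.or_eq_true, ih, List.any_eq_true,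
      List.isPrefixOf_iff_prefix]
    constructor
    · rintro (⟨p, hp, h⟩ | ⟨p, hp, j, h⟩)
      · exact ⟨p, hp, 0, by simpa using h⟩
      · exact ⟨p, hp, j + 1, by simpa using h⟩
    · rintro ⟨p, hp, j, h⟩
      cases j with
      | zero => exact Or.inl ⟨p, hp, by simpa using h⟩
      | succ j => exact Or.inr ⟨p, hp, j, by simpa using h⟩

theorem pvScanB_eq_any_isIn (t : List Char) :
    pvScanB t = SPECIAL_VALUES.any (fun special => PySem.Chars.isIn special.toList t) := by
  rcases h : SPECIAL_VALUES.any (fun special => PySem.Chars.isIn special.toList t) with _ | _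
  · rw [Bool.eq_false_iff]
    intro hc
    rw [pvScanB_true_iff] at hc
    obtain ⟨p, hp, j, hpre⟩ := hc
    obtain ⟨sp, hsp, rfl⟩ := List.mem_map.1 hp
    have : PySem.Chars.isIn sp.toList t = true :=
      (PySem.Chars.exists_prefix_drop_iff_isIn _ _).1 ⟨j, hpre⟩
    simp at h
    exact absurd this (by simpa using h sp hsp)
  · rw [List.any_eq_true] at h
    obtain ⟨sp, hsp, hin⟩ := h
    obtain ⟨j, hpre⟩ := (PySem.Chars.exists_prefix_drop_iff_isIn _ _).2 hin
    exact (pvScanB_true_iff _).2 ⟨sp.toList, List.mem_map_of_mem hsp, j, hpre⟩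

-- ===== VERDICT (by name: the statement is the Claim_ definition above) =====
theorem is_special_value_spec : Claim_equal_is_special_value := by
  intro value _
  unfold Spec_is_special_value is_special_value is_special_value_alt
  cases value with
  | none => rfl
  | some s =>
    by_cases h : PySem.Str.strip s == ""
    · simp [h]
    · simp only [h, if_neg, Bool.false_eq_true, not_false_eq_true]
      rw [pvScanB_eq_any_isIn]
      simp [PySem.Str.isIn]
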